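-- pv_equiv track=rewrite | github.com/SunsetMkt/rar | rar/compressor.py | dist_to_slot_and_extra
-- ===== SOURCE A (Python) =====
-- DCB = 64       # distance codes
--
-- def dist_to_slot_and_extra(dist_0indexed: int):
--     """Map a 0-indexed distance to distance encoding components.
--
--     The RAR5 decoder computes: Distance (1-indexed) = 1 + base + extra,
--     where for slot < 4:  base = slot, extra = 0
--     and  for slot >= 4:  base = (2|(slot&1)) << (slot//2-1), extra from bits.
--
--     We receive dist_0indexed = Distance - 1, so the base (for slot >= 4) is:
--         base = (2|(slot&1)) << (slot//2-1)   (no +1)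
--
--     For dbits >= 4: split extra into (extra >> 4) plain bits + LDD symbol.
--     For 0 < dbits < 4: write extra as plain bits.
--     For dbits == 0: no extra bits.
--
--     Returns (slot, high_extra, high_bits, ldd_sym_or_minus1)
--     """
--     dist = dist_0indexed
--     if dist < 4:
--         return dist, 0, 0, -1
--
--     for slot in range(4, DCB):
--         dbits = slot // 2 - 1
--         base = (2 | (slot & 1)) << dbits
--         top = base + (1 << dbits)
--         if dist < top:
--             extra = dist - base
--             if dbits >= 4:
--                 high_bits = dbits - 4
--                 return slot, extra >> 4, high_bits, extra & 0xF
--             else: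
--                 return slot, extra, dbits, -1
--
--     # Clamp to last slot
--     slot = DCB - 1
--     dbits = slot // 2 - 1
--     base = (2 | (slot & 1)) << dbits
--     extra = dist - base
--     if extra < 0:
--         extra = 0
--     if dbits >= 4:
--         high_bits = dbits - 4
--         return slot, extra >> 4, high_bits, extra & 0xF
--     return slot, extra, dbits, -1
-- ===== SOURCE B (Python) =====
-- DCB = 64       # distance codes
--
-- def dist_to_slot_and_extra(dist_0indexed: int):
--     """Direct bit-arithmetic version: derive slot from bit_length instead of scanning."""
--     dist = dist_0indexed
--     if dist < 4:
--         return dist, 0, 0, -1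
--     nbits = dist.bit_length()
--     dbits = nbits - 2
--     slot = 2 * (nbits - 1) + ((dist >> dbits) & 1)
--     if slot >= DCB:
--         slot = DCB - 1
--         dbits = slot // 2 - 1
--     extra = dist - ((2 | (slot & 1)) << dbits)
--     if dbits >= 4:
--         return slot, extra >> 4, dbits - 4, extra & 0xF
--     return slot, extra, dbits, -1
-- ===== Notes on version B (the rewrite author's own statement) =====
-- stated objective: faster
-- what changed: Replaces A's linear scan over the slots range(4, DCB) (computing base/top per slot until dist fits) with direct bit arithmetic: the slot is derived in O(1) from dist.bit_length() and the second-highest bit of dist.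
import Mathlib
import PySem

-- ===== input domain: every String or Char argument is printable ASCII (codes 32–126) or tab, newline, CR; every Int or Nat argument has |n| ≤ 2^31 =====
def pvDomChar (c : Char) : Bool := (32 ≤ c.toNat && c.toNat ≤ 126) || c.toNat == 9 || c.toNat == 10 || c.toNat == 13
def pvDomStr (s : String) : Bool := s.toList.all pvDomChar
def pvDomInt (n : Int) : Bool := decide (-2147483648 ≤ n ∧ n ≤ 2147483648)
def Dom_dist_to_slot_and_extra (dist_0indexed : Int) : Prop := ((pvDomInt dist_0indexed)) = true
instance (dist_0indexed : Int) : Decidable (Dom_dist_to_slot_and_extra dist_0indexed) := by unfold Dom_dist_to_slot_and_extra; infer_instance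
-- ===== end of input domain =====

-- B replaces A's linear scan over the slot range by O(1) bit arithmetic on dist.bit_length(); same return value.


-- ===== PORT A =====
def pvDCB : Int := 64

-- A's `for slot in range(4, DCB)` with its early returns: recursion over the range list; none = fell through.
-- `x << k` / `x >> k` are ported as `<<< k.toNat` / `>>> k`; exact since every shift amount here is ≥ 0.
def pvLoopA (dist : Int) : List Int → Option (Int × Int × Int × Int)
  | [] => none
  | slot :: rest =>
      let dbits := PySem.Int.floordiv slot 2 - 1
      let base := PySem.Int.bor 2 (PySem.Int.band slot 1) <<< dbits.toNat
      let top := base + ((1:Int) <<< dbits.toNat)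
      if dist < top then
        let extra := dist - base
        if dbits ≥ 4 then
          some (slot, extra >>> 4, dbits - 4, PySem.Int.band extra 0xF)
        else
          some (slot, extra, dbits, -1)
      else pvLoopA dist rest

def dist_to_slot_and_extra (dist_0indexed : Int) : Int × Int × Int × Int :=
  let dist := dist_0indexed
  if dist < 4 then (dist, 0, 0, -1)
  else
    match pvLoopA dist (PySem.List.pyRange 4 pvDCB 1) with
    | some r => r
    | none =>
        -- Clamp to last slot
        let slot := pvDCB - 1
        let dbits := PySem.Int.floordiv slot 2 - 1
        let base := PySem.Int.bor 2 (PySem.Int.band slot 1) <<< dbits.toNat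
        let extra := dist - base
        let extra := if extra < 0 then 0 else extra
        if dbits ≥ 4 then (slot, extra >>> 4, dbits - 4, PySem.Int.band extra 0xF)
        else (slot, extra, dbits, -1)

-- ===== PORT B =====
-- B's final `extra`-building and return, shared by its clamped and unclamped paths
def pvFinishB (dist slot dbits : Int) : Int × Int × Int × Int :=
  let extra := dist - (PySem.Int.bor 2 (PySem.Int.band slot 1) <<< dbits.toNat)
  if dbits ≥ 4 then (slot, extra >>> 4, dbits - 4, PySem.Int.band extra 0xF)
  else (slot, extra, dbits, -1)

def dist_to_slot_and_extra_alt (dist_0indexed : Int) : Int × Int × Int × Int :=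
  let dist := dist_0indexed
  if dist < 4 then (dist, 0, 0, -1)
  else
    let nbits : Int := (PySem.Int.bitLength dist : Int)
    let dbits := nbits - 2
    let slot := 2 * (nbits - 1) + PySem.Int.band (dist >>> dbits.toNat) 1
    if slot ≥ pvDCB then
      pvFinishB dist (pvDCB - 1) (PySem.Int.floordiv (pvDCB - 1) 2 - 1)
    else
      pvFinishB dist slot dbits

-- ===== PRECONDITION & SPEC =====
def Spec_dist_to_slot_and_extra (dist_0indexed : Int) (out : Int × Int × Int × Int) : Prop := out = dist_to_slot_and_extra_alt dist_0indexed
instance (dist_0indexed : Int) (out : Int × Int × Int × Int) : Decidable (Spec_dist_to_slot_and_extra dist_0indexed out) := by unfold Spec_dist_to_slot_and_extra; infer_instance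

-- ===== CLAIM (what is proved, stated in full; the proofs are below) =====
def Claim_equal_dist_to_slot_and_extra : Prop := ∀ (dist_0indexed : Int), Dom_dist_to_slot_and_extra dist_0indexed → Spec_dist_to_slot_and_extra dist_0indexed (dist_to_slot_and_extra dist_0indexed)

-- ===== LEMMAS AND PROOFS =====

-- base of slot s, in arithmetic form
def pvBase (s : Int) : Int := (2 + PySem.Int.mod s 2) * 2 ^ (PySem.Int.floordiv s 2 - 1).toNat

-- what the A-loop returns when it stops at slot s
def pvAnswer (s dist : Int) : Int × Int × Int × Int :=
  let dbits := PySem.Int.floordiv s 2 - 1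
  let extra := dist - pvBase s
  if dbits ≥ 4 then (s, extra >>> 4, dbits - 4, PySem.Int.band extra 0xF)
  else (s, extra, dbits, -1)

theorem pvBase_eq (s : Int) :
    PySem.Int.bor 2 (PySem.Int.band s 1) <<< (PySem.Int.floordiv s 2 - 1).toNat = pvBase s := by
  rw [PySem.Int.band_one, pvBase, Int.shiftLeft_eq]
  rcases PySem.Int.mod_two_eq s with h | h <;> rw [h]
  · rw [show PySem.Int.bor 2 0 = 2 from by decide]; norm_num
  · rw [show PySem.Int.bor 2 1 = 3 from by decide]; norm_num

theorem pvTop_eq (s : Int) (hs : 2 ≤ s) :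
    PySem.Int.bor 2 (PySem.Int.band s 1) <<< (PySem.Int.floordiv s 2 - 1).toNat
      + ((1:Int) <<< (PySem.Int.floordiv s 2 - 1).toNat) = pvBase (s + 1) := by
  rw [pvBase_eq, Int.shiftLeft_eq, one_mul]
  unfold pvBase
  simp only [PySem.Int.floordiv_eq_ediv_of_pos (by norm_num : (0:Int) < 2),
             PySem.Int.mod_eq_emod_of_pos (by norm_num : (0:Int) < 2)]
  rcases Int.emod_two_eq s with h | h
  · have h2 : (s + 1) % 2 = 1 := by omega
    have h3 : (s + 1) / 2 = s / 2 := by omega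
    rw [h, h2, h3]; ring
  · have h2 : (s + 1) % 2 = 0 := by omega
    have h4 : ((s + 1) / 2 - 1).toNat = (s / 2 - 1).toNat + 1 := by omega
    rw [h, h2, h4, pow_succ]; ring

theorem pvLoopA_head (dist s : Int) (hs : 2 ≤ s) (rest : List Int) :
    pvLoopA dist (s :: rest) =
      if dist < pvBase (s + 1) then some (pvAnswer s dist) else pvLoopA dist rest := by
  show (if dist < _ + _ then _ else _) = _
  rw [pvTop_eq s hs, pvBase_eq]
  simp only [pvAnswer]
  split_ifs <;> rfl

theorem pvBase_step (s : Int) (hs : 2 ≤ s) : pvBase s ≤ pvBase (s + 1) := by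
  unfold pvBase
  simp only [PySem.Int.floordiv_eq_ediv_of_pos (by norm_num : (0:Int) < 2),
             PySem.Int.mod_eq_emod_of_pos (by norm_num : (0:Int) < 2)]
  rcases Int.emod_two_eq s with h | h
  · have h2 : (s + 1) % 2 = 1 := by omega
    have h3 : (s + 1) / 2 = s / 2 := by omega
    rw [h, h2, h3]
    have : (0:Int) < 2 ^ (s / 2 - 1).toNat := by positivity
    nlinarith
  · have h2 : (s + 1) % 2 = 0 := by omega
    have h4 : ((s + 1) / 2 - 1).toNat = (s / 2 - 1).toNat + 1 := by omega
    rw [h, h2, h4, pow_succ]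
    have : (0:Int) < 2 ^ (s / 2 - 1).toNat := by positivity
    nlinarith

theorem pvBase_mono (s t : Int) (hs : 2 ≤ s) (hst : s ≤ t) : pvBase s ≤ pvBase t := by
  obtain ⟨n, rfl⟩ := Int.le.dest hst
  clear hst
  induction n with
  | zero => simp
  | succ k ih =>
      have h2 : pvBase (s + k) ≤ pvBase (s + k + 1) := pvBase_step _ (by omega)
      have h3 : (s + ((k:Nat) + 1 : Nat) : Int) = s + (k:Int) + 1 := by push_cast; ring
      rw [h3]
      exact le_trans ih h2

theorem pvLoopA_skip (dist : Int) (n : Nat) : ∀ a b : Int, b - a = n → 2 ≤ a → a ≤ b →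
    pvBase b ≤ dist → pvLoopA dist (PySem.List.pyRange a b 1) = none := by
  induction n with
  | zero =>
      intro a b hn _ _ _
      rw [PySem.List.pyRange_one_eq_nil (by omega)]
      rfl
  | succ k ih =>
      intro a b hn ha hab hd
      rw [PySem.List.pyRange_one_cons (by omega), pvLoopA_head dist a (by omega)]
      rw [if_neg (by have := pvBase_mono (a + 1) b (by omega) (by omega); omega)]
      exact ih (a + 1) b (by omega) (by omega) (by omega) hd

theorem pvLoopA_append (dist : Int) (l1 l2 : List Int) (h0 : ∀ s ∈ l1, 2 ≤ s) :
    pvLoopA dist (l1 ++ l2) =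
      match pvLoopA dist l1 with
      | some r => some r
      | none => pvLoopA dist l2 := by
  induction l1 with
  | nil => rfl
  | cons s rest ih =>
      rw [List.cons_append, pvLoopA_head dist s (h0 s List.mem_cons_self) rest,
          pvLoopA_head dist s (h0 s List.mem_cons_self) (rest ++ l2)]
      by_cases h : dist < pvBase (s + 1)
      · rw [if_pos h, if_pos h]
      · rw [if_neg h, if_neg h]
        exact ih (fun t ht => h0 t (List.mem_cons_of_mem _ ht))

-- the loop, started at 4, stops exactly on slot s when dist lies in [base s, base (s+1))
theorem pvLoopA_hit (dist s : Int) (hs : 4 ≤ s) (hs' : s < 64)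
    (hlo : pvBase s ≤ dist) (hhi : dist < pvBase (s + 1)) :
    pvLoopA dist (PySem.List.pyRange 4 pvDCB 1) = some (pvAnswer s dist) := by
  show pvLoopA dist (PySem.List.pyRange 4 64 1) = _
  rw [PySem.List.pyRange_one_append 4 s 64 (by omega) (by omega),
      pvLoopA_append dist _ _ (fun t ht => by have := (PySem.List.mem_pyRange_one).mp ht; omega),
      pvLoopA_skip dist (s - 4).toNat 4 s (by omega) (by omega) (by omega) hlo,
      PySem.List.pyRange_one_cons (by omega), pvLoopA_head dist s (by omega), if_pos hhi]

theorem pvFinishB_eq (dist s : Int) :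
    pvFinishB dist s (PySem.Int.floordiv s 2 - 1) = pvAnswer s dist := by
  unfold pvFinishB pvAnswer
  rw [pvBase_eq]

theorem pvBase_closed (m r : Int) (_hm : 1 ≤ m) (hr : r = 0 ∨ r = 1) :
    pvBase (2 * m + r) = (2 + r) * 2 ^ (m - 1).toNat := by
  unfold pvBase
  rw [PySem.Int.floordiv_eq_ediv_of_pos (by norm_num : (0:Int) < 2),
      PySem.Int.mod_eq_emod_of_pos (by norm_num : (0:Int) < 2)]
  have h1 : (2 * m + r) % 2 = r := by omega
  have h2 : (2 * m + r) / 2 = m := by omega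
  rw [h1, h2]

theorem pvFloordiv_slot (m r : Int) (hr : r = 0 ∨ r = 1) :
    PySem.Int.floordiv (2 * m + r) 2 - 1 = m - 1 := by
  rw [PySem.Int.floordiv_eq_ediv_of_pos (by norm_num : (0:Int) < 2)]
  omega

-- ===== VERDICT (by name: the statement is the Claim_ definition above) =====
theorem dist_to_slot_and_extra_spec : Claim_equal_dist_to_slot_and_extra := by
  intro dist hdom
  unfold Dom_dist_to_slot_and_extra pvDomInt at hdom
  rw [decide_eq_true_iff] at hdom
  unfold Spec_dist_to_slot_and_extra
  by_cases h4 : dist < 4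
  · unfold dist_to_slot_and_extra dist_to_slot_and_extra_alt
    rw [if_pos h4, if_pos h4]
  · set K : Nat := PySem.Int.bitLength dist with hK
    have hpos : (0:Int) < dist := by omega
    have habs : (dist.natAbs : Int) = dist := Int.natAbs_of_nonneg (le_of_lt hpos)
    have hloN : 2 ^ (K - 1) ≤ dist.natAbs := PySem.Int.two_pow_bitLength_le dist (by omega)
    have hhiN : dist.natAbs < 2 ^ K := PySem.Int.lt_two_pow_bitLength dist
    have hK3 : 3 ≤ K := by
      by_contra hc
      have hc2 : K ≤ 2 := by omega
      have : (2:Nat) ^ K ≤ 2 ^ 2 := Nat.pow_le_pow_right (by norm_num) hc2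
      omega
    have hK32 : K ≤ 32 := by
      by_contra hc
      have h32 : 32 ≤ K - 1 := by omega
      have h1 : (2:Nat) ^ 32 ≤ 2 ^ (K - 1) := Nat.pow_le_pow_right (by norm_num) h32
      have h2 : (2:Nat) ^ 32 ≤ dist.natAbs := le_trans h1 hloN
      have h3 : ((2:Nat)^32 : Int) ≤ (dist.natAbs : Int) := by exact_mod_cast h2
      rw [habs] at h3
      norm_num at h3
      omega
    set e : Nat := K - 2 with he
    set p : Int := 2 ^ e with hp
    have hppos : (0:Int) < p := by positivity
    have hlo : 2 * p ≤ dist := by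
      have h1 : ((2:Nat) ^ (K-1) : Int) ≤ (dist.natAbs : Int) := by exact_mod_cast hloN
      rw [habs] at h1
      have hKe : K - 1 = e + 1 := by omega
      rw [hKe] at h1
      push_cast at h1
      rw [pow_succ] at h1
      rw [hp]; linarith
    have hhi : dist < 4 * p := by
      have h1 : (dist.natAbs : Int) < ((2:Nat) ^ K : Int) := by exact_mod_cast hhiN
      rw [habs] at h1
      have hKe : K = e + 2 := by omega
      rw [hKe] at h1
      push_cast at h1
      rw [pow_succ, pow_succ] at h1
      rw [hp]; linarith
    have hshift : dist >>> e = dist / p := by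
      rw [Int.shiftRight_eq_div_pow]; push_cast; rw [hp]
    set q : Int := dist / p with hq
    have hq2 : 2 ≤ q := by rw [hq, Int.le_ediv_iff_mul_le hppos]; linarith
    have hq4 : q < 4 := by rw [hq, Int.ediv_lt_iff_lt_mul hppos]; linarith
    have hqlo : q * p ≤ dist := by
      rw [hq]; exact (Int.le_ediv_iff_mul_le hppos).mp le_rfl
    have hqhi : dist < (q + 1) * p := by
      rw [hq]; exact Int.lt_ediv_add_one_mul_self dist hppos
    -- the selected digit r and slot
    set r : Int := PySem.Int.band (dist >>> e) 1 with hr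
    have hrq : r = q % 2 := by
      rw [hr, PySem.Int.band_one, PySem.Int.mod_eq_emod_of_pos (by norm_num), hshift]
    have hr01 : r = 0 ∨ r = 1 := by rcases Int.emod_two_eq q with h | h <;> [left; right] <;> omega
    set slot : Int := 2 * ((K:Int) - 1) + r with hslot
    have hslot4 : 4 ≤ slot := by rcases hr01 with h | h <;> omega
    have hslot64 : slot < 64 := by rcases hr01 with h | h <;> omega
    -- slot = 2*(K-1) + r with K-1 ≥ 2; its base and the next base
    have hKm1 : (1:Int) ≤ (K:Int) - 1 := by omega
    have htoNat : ((K:Int) - 1 - 1).toNat = e := by omega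
    have hbase_slot : pvBase slot = (2 + r) * p := by
      rw [hslot, pvBase_closed ((K:Int) - 1) r hKm1 hr01, htoNat, hp]
    have hbase_next : pvBase (slot + 1) = (3 + r) * p := by
      rcases hr01 with h | h
      · have : slot + 1 = 2 * ((K:Int) - 1) + 1 := by omega
        rw [this, pvBase_closed ((K:Int) - 1) 1 hKm1 (Or.inr rfl), htoNat, hp, h]; ring
      · have h1 : slot + 1 = 2 * (K:Int) + 0 := by omega
        have h2 : ((K:Int) - 1).toNat = e + 1 := by omega
        rw [h1, pvBase_closed (K:Int) 0 (by omega) (Or.inl rfl), h2, hp, h, pow_succ]; ring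
    -- dist lies in [base slot, base (slot+1))
    have hin_lo : pvBase slot ≤ dist := by
      rw [hbase_slot]
      rcases hr01 with h | h
      · rw [h]; linarith
      · have hq3 : q = 3 := by rw [hrq] at h; omega
        rw [h]; rw [hq3] at hqlo; linarith
    have hin_hi : dist < pvBase (slot + 1) := by
      rw [hbase_next]
      rcases hr01 with h | h
      · have hq2' : q = 2 := by rw [hrq] at h; omega
        rw [h]; rw [hq2'] at hqhi; linarith
      · rw [h]; linarith
    -- evaluate A
    have hA : dist_to_slot_and_extra dist = pvAnswer slot dist := by
      unfold dist_to_slot_and_extra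
      rw [if_neg (by omega), pvLoopA_hit dist slot hslot4 hslot64 hin_lo hin_hi]
    -- evaluate B
    have hB : dist_to_slot_and_extra_alt dist = pvAnswer slot dist := by
      simp only [dist_to_slot_and_extra_alt]
      rw [if_neg (by omega)]
      have hdb : (((K:Int) - 2)).toNat = e := by omega
      rw [show (2 * ((PySem.Int.bitLength dist : Int) - 1) + PySem.Int.band (dist >>> ((PySem.Int.bitLength dist : Int) - 2).toNat) 1) = slot from by rw [hslot, hr, ← hK, hdb]]
      rw [if_neg (by unfold pvDCB; omega)]
      have : ((K:Int) - 2) = PySem.Int.floordiv slot 2 - 1 := by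
        rw [hslot, pvFloordiv_slot ((K:Int) - 1) r hr01]; omega
      rw [show ((PySem.Int.bitLength dist : Int) - 2) = PySem.Int.floordiv slot 2 - 1 from by rw [← hK]; exact this]
      exact pvFinishB_eq dist slot
    rw [hA, hB]
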